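-- pv_equiv track=rewrite | github.com/mekrr/Python-Tutorials | MinimumPossibleSumofCost.py | solution
-- ===== SOURCE A (Python) =====
-- def solution(A,B,N):
--   A.sort()
--   B.sort(reverse=True)
--
--
--   table = [[ 0 for i in range(N+1)] for j in range(N+1)]
--
--   for i in range(1,N+1):
--     table[i][i] = A[i-1] * B[i-1]
--
--   for i in range(1,N):
--     for j in range(1,N-i+1):
--       table[j][j+i] = table[j][j+i-1] + table[j+1][j+i] - table[j+1][j+i-1]
--
--   minimumSum = 0
--
--   for row in table:
--     minimumSum += sum(row)
--
--   return minimumSum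
-- ===== SOURCE B (Python) =====
-- def solution(A, B, N):
--   A.sort()
--   B.sort(reverse=True)
--   total = 0
--   for k in range(1, N + 1):
--     total += A[k-1] * B[k-1] * k * (N - k + 1)
--   return total
-- ===== Notes on version B (the rewrite author's own statement) =====
-- stated objective: faster
-- what changed: Replaces the O(N^2) interval DP table and its full-table summation by the closed form sum A[k-1]*B[k-1]*k*(N-k+1) over the sorted pairing, since table[j][k] is the sum of diagonal products for t in [j,k] and each diagonal term is counted k*(N-k+1) times.
import Mathlib
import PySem

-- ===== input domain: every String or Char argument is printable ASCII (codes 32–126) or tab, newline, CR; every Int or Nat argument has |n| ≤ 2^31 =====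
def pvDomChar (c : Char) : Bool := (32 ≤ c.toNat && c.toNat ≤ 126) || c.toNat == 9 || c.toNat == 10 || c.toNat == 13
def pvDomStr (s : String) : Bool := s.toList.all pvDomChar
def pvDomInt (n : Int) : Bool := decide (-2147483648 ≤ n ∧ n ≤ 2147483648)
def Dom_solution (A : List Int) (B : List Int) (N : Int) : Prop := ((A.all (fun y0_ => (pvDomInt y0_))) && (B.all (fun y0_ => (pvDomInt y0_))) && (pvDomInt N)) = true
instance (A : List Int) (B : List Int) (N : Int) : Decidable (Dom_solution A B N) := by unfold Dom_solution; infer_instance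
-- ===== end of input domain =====

-- B replaces A's O(N^2) interval-DP table and full-table sum by the closed form
-- sum over k of A[k-1]*B[k-1]*k*(N-k+1) after the same sorts (Python A and B both
-- sort the argument lists in place; the equivalence proved here is about the return value).

-- ===== PORT A =====
-- A's 2D table is ported as a function Int → Int → Int (all entries 0 initially);
-- each Python assignment table[i][j] = v becomes a functional update, loops stay foldl
-- over the same ranges in the same order.
def solution (A : List Int) (B : List Int) (N : Int) : Int :=
  let As := PySem.List.sorted A (fun x => x) false
  let Bs := PySem.List.sorted B (fun x => x) true
  let t0 : Int → Int → Int := fun _ _ => 0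
  let t1 := (PySem.List.pyRange 1 (N+1) 1).foldl
      (fun t i => fun p q => if p = i ∧ q = i then
          PySem.List.pyGetD As (i-1) 0 * PySem.List.pyGetD Bs (i-1) 0 else t p q) t0
  let t2 := (PySem.List.pyRange 1 N 1).foldl
      (fun t i => (PySem.List.pyRange 1 (N-i+1) 1).foldl
         (fun t j => fun p q => if p = j ∧ q = j + i then
             t j (j+i-1) + t (j+1) (j+i) - t (j+1) (j+i-1) else t p q) t) t1
  (PySem.List.pyRange 0 (N+1) 1).foldl
      (fun s r => s + (PySem.List.pyRange 0 (N+1) 1).foldl (fun s2 c => s2 + t2 r c) 0) 0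

-- ===== PORT B =====
def solution_alt (A : List Int) (B : List Int) (N : Int) : Int :=
  let As := PySem.List.sorted A (fun x => x) false
  let Bs := PySem.List.sorted B (fun x => x) true
  (PySem.List.pyRange 1 (N+1) 1).foldl
    (fun s k => s + PySem.List.pyGetD As (k-1) 0 * PySem.List.pyGetD Bs (k-1) 0 * k * (N - k + 1)) 0

-- ===== PRECONDITION & SPEC =====
-- Pre_ excludes exactly the inputs where Python A raises IndexError (N larger than a list).
def Pre_solution (A : List Int) (B : List Int) (N : Int) : Prop :=
  N ≤ (A.length : Int) ∧ N ≤ (B.length : Int)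
instance (A : List Int) (B : List Int) (N : Int) : Decidable (Pre_solution A B N) := by
  unfold Pre_solution; infer_instance
def pvWitness_solution : List Int × List Int × Int := ([4, 2, 6], [1, 5, 3], 3)

def Spec_solution (A : List Int) (B : List Int) (N : Int) (out : Int) : Prop := out = solution_alt A B N
instance (A : List Int) (B : List Int) (N : Int) (out : Int) : Decidable (Spec_solution A B N out) := by
  unfold Spec_solution; infer_instance

-- ===== CLAIM (what is proved, stated in full; the proofs are below) =====
def Claim_equal_solution : Prop := ∀ (A : List Int) (B : List Int) (N : Int), Dom_solution A B N → Pre_solution A B N → Spec_solution A B N (solution A B N)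

-- ===== LEMMAS AND PROOFS =====

theorem diagFoldAux (C : Int → Int) (b : Int) : ∀ (k : Nat) (a : Int), (b - a).toNat ≤ k →
    ∀ t : Int → Int → Int,
    (PySem.List.pyRange a b 1).foldl
      (fun t i => fun p q => if p = i ∧ q = i then C i else t p q) t
    = fun p q => if a ≤ p ∧ p < b ∧ q = p then C p else t p q := by
  intro k
  induction k with
  | zero =>
    intro a ha t
    rw [PySem.List.pyRange_one_eq_nil (by omega)]
    funext p q
    simp only [List.foldl_nil]
    split_ifs with h
    · exact absurd h (by omega)
    · rfl
  | succ k ih =>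
    intro a ha t
    by_cases hab : a < b
    · rw [PySem.List.pyRange_one_cons hab, List.foldl_cons, ih (a+1) (by omega)]
      funext p q
      by_cases h2 : p = a ∧ q = a
      · obtain ⟨rfl, rfl⟩ := h2
        rw [if_neg (by omega), if_pos ⟨rfl, rfl⟩, if_pos ⟨le_refl _, hab, rfl⟩]
      · split_ifs with h1 h3 h3 <;> first | rfl | omega
    · rw [PySem.List.pyRange_one_eq_nil (by omega)]
      funext p q
      simp only [List.foldl_nil]
      split_ifs with h
      · exact absurd h (by omega)
      · rfl

theorem innerFoldAux (i b : Int) : ∀ (k : Nat) (a : Int), (b - a).toNat ≤ k →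
    ∀ t : Int → Int → Int,
    (PySem.List.pyRange a b 1).foldl
      (fun t j => fun p q => if p = j ∧ q = j + i then
          t j (j+i-1) + t (j+1) (j+i) - t (j+1) (j+i-1) else t p q) t
    = fun p q => if a ≤ p ∧ p < b ∧ q = p + i then
          t p (p+i-1) + t (p+1) (p+i) - t (p+1) (p+i-1) else t p q := by
  intro k
  induction k with
  | zero =>
    intro a ha t
    rw [PySem.List.pyRange_one_eq_nil (by omega)]
    funext p q
    simp only [List.foldl_nil]
    split_ifs with h
    · exact absurd h (by omega)
    · rfl
  | succ k ih =>
    intro a ha t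
    by_cases hab : a < b
    · rw [PySem.List.pyRange_one_cons hab, List.foldl_cons, ih (a+1) (by omega)]
      funext p q
      by_cases h2 : p = a ∧ q = a + i
      · obtain ⟨rfl, rfl⟩ := h2
        rw [if_neg (by omega), if_pos ⟨rfl, rfl⟩, if_pos ⟨le_refl _, hab, rfl⟩]
      · by_cases h1 : a + 1 ≤ p ∧ p < b ∧ q = p + i
        · rw [if_pos h1, if_pos (⟨by omega, h1.2.1, h1.2.2⟩ : a ≤ p ∧ p < b ∧ q = p + i),
              if_neg (by omega), if_neg (by omega), if_neg (by omega)]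
        · rw [if_neg h1, if_neg (by omega : ¬(a ≤ p ∧ p < b ∧ q = p + i)), if_neg h2]
    · rw [PySem.List.pyRange_one_eq_nil (by omega)]
      funext p q
      simp only [List.foldl_nil]
      split_ifs with h
      · exact absurd h (by omega)
      · rfl

def Spart (C : Int → Int) (p q : Int) : Int := ((PySem.List.pyRange p (q+1) 1).map C).sum

theorem Spart_nil (C : Int → Int) {p q : Int} (h : q < p) : Spart C p q = 0 := by
  unfold Spart; rw [PySem.List.pyRange_one_eq_nil (by omega)]; rfl

theorem Spart_single (C : Int → Int) (p : Int) : Spart C p p = C p := by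
  unfold Spart; rw [PySem.List.pyRange_one_singleton]; simp

theorem Spart_cons (C : Int → Int) {p q : Int} (h : p ≤ q) : Spart C p q = C p + Spart C (p+1) q := by
  unfold Spart; rw [PySem.List.pyRange_one_cons (by omega)]; simp

theorem Spart_snoc (C : Int → Int) {p q : Int} (h : p ≤ q + 1) :
    Spart C p (q+1) = Spart C p q + C (q+1) := by
  unfold Spart
  rw [show q + 1 + 1 = (q+1) + 1 from rfl, PySem.List.pyRange_one_succ_right (by omega)]
  simp

def Tb (C : Int → Int) (N g : Int) : Int → Int → Int :=
  fun p q => if 1 ≤ p ∧ p ≤ q ∧ q - p ≤ g ∧ q ≤ N then Spart C p q else 0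

theorem outerFold (C : Int → Int) (N : Int) : ∀ g : Nat,
    (PySem.List.pyRange 1 (1+(g:Int)) 1).foldl
      (fun t i => (PySem.List.pyRange 1 (N-i+1) 1).foldl
         (fun t j => fun p q => if p = j ∧ q = j + i then
             t j (j+i-1) + t (j+1) (j+i) - t (j+1) (j+i-1) else t p q) t) (Tb C N 0)
    = Tb C N g := by
  intro g
  induction g with
  | zero => rw [PySem.List.pyRange_one_eq_nil (by omega)]; rfl
  | succ g ih =>
    rw [show (1:Int) + ((g:Nat)+1:Nat) = (1+(g:Int)) + 1 by push_cast; ring,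
        PySem.List.pyRange_one_succ_right (by omega), List.foldl_append, ih,
        List.foldl_cons, List.foldl_nil,
        innerFoldAux (1+(g:Int)) (N-(1+(g:Int))+1) ((N-(1+(g:Int))+1-1).toNat) 1 (by omega)]
    funext p q
    set i : Int := 1 + (g:Int) with hi
    by_cases h1 : 1 ≤ p ∧ p < N - i + 1 ∧ q = p + i
    · rw [if_pos h1]
      have e1 : Tb C N (g:Int) p (p+i-1) = Spart C p (p+i-1) :=
        if_pos ⟨h1.1, by omega, by omega, by omega⟩
      have e2 : Tb C N (g:Int) (p+1) (p+i) = Spart C (p+1) (p+i) :=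
        if_pos ⟨by omega, by omega, by omega, by omega⟩
      have e3 : Tb C N (g:Int) (p+1) (p+i-1) = Spart C (p+1) (p+i-1) := by
        by_cases hii : p + 1 ≤ p + i - 1
        · exact if_pos ⟨by omega, hii, by omega, by omega⟩
        · rw [Spart_nil C (by omega)]; exact if_neg (by omega)
      rw [e1, e2, e3]
      have e4 : Tb C N ((g+1:Nat):Int) p q = Spart C p q :=
        if_pos ⟨h1.1, by omega, by omega, by omega⟩
      rw [e4, h1.2.2, Spart_cons C (by omega : p ≤ p + i - 1),
          Spart_cons C (by omega : p ≤ p + i)]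
      ring
    · rw [if_neg h1]
      show Tb C N (g:Int) p q = Tb C N ((g+1:Nat):Int) p q
      unfold Tb
      split_ifs <;> first | rfl | omega

theorem rowS (C : Int → Int) : ∀ m : Nat,
    ((PySem.List.pyRange 1 ((m:Int)+1) 1).map (fun p => Spart C p (m:Int))).sum
    = ((PySem.List.pyRange 1 ((m:Int)+1) 1).map (fun t => t * C t)).sum := by
  intro m
  induction m with
  | zero => rw [PySem.List.pyRange_one_eq_nil (by omega)]; rfl
  | succ m ih =>
    have hc : ((m+1:Nat):Int) = (m:Int)+1 := by push_cast; ring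
    rw [hc, PySem.List.pyRange_one_succ_right (by omega), List.map_append, List.map_append,
        List.sum_append, List.sum_append]
    have e1 : (PySem.List.pyRange 1 ((m:Int)+1) 1).map (fun p => Spart C p ((m:Int)+1))
        = (PySem.List.pyRange 1 ((m:Int)+1) 1).map (fun p => Spart C p (m:Int) + C ((m:Int)+1)) := by
      apply List.map_congr_left
      intro p hp
      rw [PySem.List.mem_pyRange_one] at hp
      exact Spart_snoc C (by omega)
    rw [e1, PySem.List.sum_map_add_int, PySem.List.sum_map_const_int, ih]
    simp only [List.map_cons, List.map_nil, List.sum_cons, List.sum_nil,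
      PySem.List.length_pyRange_one, Spart_single]
    have : (((m:Int)+1-1).toNat : Int) = (m:Int) := by omega
    rw [this]
    ring

theorem mainSum (C : Int → Int) : ∀ n : Nat,
    ((PySem.List.pyRange 1 ((n:Int)+1) 1).map
        (fun r => ((PySem.List.pyRange r ((n:Int)+1) 1).map (fun c => Spart C r c)).sum)).sum
    = ((PySem.List.pyRange 1 ((n:Int)+1) 1).map (fun k => C k * k * ((n:Int)-k+1))).sum := by
  intro n
  induction n with
  | zero => rw [PySem.List.pyRange_one_eq_nil (by omega)]; rfl
  | succ n ih =>
    have hc : ((n+1:Nat):Int) = (n:Int)+1 := by push_cast; ring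
    rw [hc, PySem.List.pyRange_one_succ_right (by omega : (1:Int) ≤ (n:Int)+1),
        List.map_append, List.map_append, List.sum_append, List.sum_append]
    have e1 : (PySem.List.pyRange 1 ((n:Int)+1) 1).map
          (fun r => ((PySem.List.pyRange r ((n:Int)+1+1) 1).map (fun c => Spart C r c)).sum)
        = (PySem.List.pyRange 1 ((n:Int)+1) 1).map
          (fun r => ((PySem.List.pyRange r ((n:Int)+1) 1).map (fun c => Spart C r c)).sum
            + Spart C r ((n:Int)+1)) := by
      apply List.map_congr_left
      intro r hr
      rw [PySem.List.mem_pyRange_one] at hr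
      rw [PySem.List.pyRange_one_succ_right (by omega : r ≤ (n:Int)+1), List.map_append,
          List.sum_append]
      simp
    have e2 : (PySem.List.pyRange 1 ((n:Int)+1) 1).map (fun k => C k * k * ((n:Int)+1-k+1))
        = (PySem.List.pyRange 1 ((n:Int)+1) 1).map (fun k => C k * k * ((n:Int)-k+1) + k * C k) := by
      apply List.map_congr_left
      intro k hk
      ring
    rw [e1, e2, PySem.List.sum_map_add_int, PySem.List.sum_map_add_int, ih]
    simp only [List.map_cons, List.map_nil, List.sum_cons, List.sum_nil]
    rw [PySem.List.pyRange_one_singleton, List.map_cons, List.map_nil, List.sum_cons,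
        List.sum_nil, Spart_single]
    have hrow := rowS C (n+1)
    rw [hc, PySem.List.pyRange_one_succ_right (by omega : (1:Int) ≤ (n:Int)+1),
        List.map_append, List.map_append, List.sum_append, List.sum_append] at hrow
    simp only [List.map_cons, List.map_nil, List.sum_cons, List.sum_nil, Spart_single] at hrow
    ring_nf at hrow ⊢
    linarith [hrow]

theorem coreEq (C : Int → Int) (N : Int) :
    (PySem.List.pyRange 0 (N+1) 1).foldl
      (fun s r => s + (PySem.List.pyRange 0 (N+1) 1).foldl
        (fun s2 c => s2 +
          ((PySem.List.pyRange 1 N 1).foldl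
            (fun t i => (PySem.List.pyRange 1 (N-i+1) 1).foldl
               (fun t j => fun p q => if p = j ∧ q = j + i then
                   t j (j+i-1) + t (j+1) (j+i) - t (j+1) (j+i-1) else t p q) t)
            ((PySem.List.pyRange 1 (N+1) 1).foldl
              (fun t i => fun p q => if p = i ∧ q = i then C i else t p q)
              (fun _ _ => 0))) r c) 0) 0
    = (PySem.List.pyRange 1 (N+1) 1).foldl (fun s k => s + C k * k * (N - k + 1)) 0 := by
  have hdiag : (PySem.List.pyRange 1 (N+1) 1).foldl
      (fun t i => fun p q => if p = i ∧ q = i then C i else t p q)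
      (fun _ _ => (0:Int)) = Tb C N 0 := by
    rw [diagFoldAux C (N+1) ((N+1-1).toNat) 1 (by omega)]
    funext p q
    unfold Tb
    split_ifs with h h2 h2
    · rw [h.2.2, Spart_single]
    · omega
    · omega
    · rfl
  rw [hdiag]
  by_cases hN : 1 ≤ N
  · have houter : (PySem.List.pyRange 1 N 1).foldl
        (fun t i => (PySem.List.pyRange 1 (N-i+1) 1).foldl
           (fun t j => fun p q => if p = j ∧ q = j + i then
               t j (j+i-1) + t (j+1) (j+i) - t (j+1) (j+i-1) else t p q) t)
        (Tb C N 0) = Tb C N ((N-1).toNat : Int) := by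
      have h := outerFold C N (N-1).toNat
      rw [show (1:Int) + ((N-1).toNat : Int) = N by omega] at h
      exact h
    rw [houter]
    have hTb : Tb C N ((N-1).toNat : Int)
        = fun p q => if 1 ≤ p ∧ p ≤ q ∧ q ≤ N then Spart C p q else 0 := by
      funext p q
      unfold Tb
      split_ifs with h h2 h2 <;> first | rfl | omega
    rw [hTb]
    simp only [PySem.List.foldl_add, zero_add]
    have hsplit : ∀ (F : Int → Int), ((PySem.List.pyRange 0 (N+1) 1).map F).sum
        = F 0 + ((PySem.List.pyRange 1 (N+1) 1).map F).sum := by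
      intro F
      rw [PySem.List.pyRange_one_cons (by omega : (0:Int) < N+1), List.map_cons, List.sum_cons,
          show (0:Int)+1 = 1 from rfl]
    rw [hsplit]
    have h0 : ((PySem.List.pyRange 0 (N+1) 1).map
        (fun c => if 1 ≤ (0:Int) ∧ (0:Int) ≤ c ∧ c ≤ N then Spart C 0 c else 0)).sum = 0 := by
      apply List.sum_eq_zero
      intro x hx
      obtain ⟨c, _, rfl⟩ := List.mem_map.mp hx
      rw [if_neg (by omega)]
    rw [h0, zero_add]
    have hrow : (PySem.List.pyRange 1 (N+1) 1).map
          (fun r => ((PySem.List.pyRange 0 (N+1) 1).map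
            (fun c => if 1 ≤ r ∧ r ≤ c ∧ c ≤ N then Spart C r c else 0)).sum)
        = (PySem.List.pyRange 1 (N+1) 1).map
          (fun r => ((PySem.List.pyRange r (N+1) 1).map (fun c => Spart C r c)).sum) := by
      apply List.map_congr_left
      intro r hr
      rw [PySem.List.mem_pyRange_one] at hr
      rw [PySem.List.pyRange_one_append 0 r (N+1) (by omega) (by omega), List.map_append,
          List.sum_append]
      have hz : ((PySem.List.pyRange 0 r 1).map
          (fun c => if 1 ≤ r ∧ r ≤ c ∧ c ≤ N then Spart C r c else 0)).sum = 0 := by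
        apply List.sum_eq_zero
        intro x hx
        obtain ⟨c, hc, rfl⟩ := List.mem_map.mp hx
        rw [PySem.List.mem_pyRange_one] at hc
        rw [if_neg (by omega)]
      rw [hz, zero_add]
      apply congrArg
      apply List.map_congr_left
      intro c hc
      rw [PySem.List.mem_pyRange_one] at hc
      rw [if_pos ⟨by omega, by omega, by omega⟩]
    rw [hrow]
    have hmain := mainSum C N.toNat
    rw [show ((N.toNat : Int)) = N by omega] at hmain
    exact hmain
  · rw [PySem.List.pyRange_one_eq_nil (by omega : N ≤ (1:Int))]
    simp only [List.foldl_nil, PySem.List.foldl_add, zero_add]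
    rw [PySem.List.pyRange_one_eq_nil (by omega : N + 1 ≤ (1:Int)), List.map_nil, List.sum_nil]
    apply List.sum_eq_zero
    intro x hx
    obtain ⟨r, _, rfl⟩ := List.mem_map.mp hx
    apply List.sum_eq_zero
    intro y hy
    obtain ⟨c, _, rfl⟩ := List.mem_map.mp hy
    show Tb C N 0 r c = 0
    unfold Tb
    rw [if_neg (by omega)]

-- ===== VERDICT (by name: the statement is the Claim_ definition above) =====
theorem solution_spec : Claim_equal_solution := by
  intro A B N _ _
  unfold Spec_solution solution solution_alt
  exact coreEq (fun k =>
    PySem.List.pyGetD (PySem.List.sorted A (fun x => x) false) (k-1) 0 *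
    PySem.List.pyGetD (PySem.List.sorted B (fun x => x) true) (k-1) 0) N
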